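-- pv_equiv track=rewrite | github.com/db-Lee/iclr2026-5078 | multigenprm/data/preprocess_data.py | get_prm_label
-- ===== SOURCE A (Python) =====
-- def get_first_error_step_index(labels):
--     """Helper function to find first error position"""
--     for i, label in enumerate(labels):
--         if label == -1:
--             return i
--     return len(labels)
--
-- def normalize_process_labels(labels):
--     """
--     Normalize labels to valid process format: [1,1,1,...,-1,-1,-1,...]
--     Once we find the first -1, all subsequent labels become -1.
--     """
--     if not labels:
--         return []
--
--     normalized = labels.copy()
--     first_error_pos = get_first_error_step_index(labels)
--
--     # Make all labels before first error position become 1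
--     for i in range(0, first_error_pos):
--         normalized[i] = 1
--
--     # Make all labels after first error position become -1
--     for i in range(first_error_pos, len(normalized)):
--         normalized[i] = -1
--
--     return normalized
--
-- def get_prm_label(data):
--     """Get PRM labels with normalization."""
--     # Use normalized original labels
--     full_labels = normalize_process_labels(data["labels"])
--
--     # Cut off at the first -1 (original behavior)
--     label = []
--     for l in full_labels:
--         label.append(l)
--         if l == -1:
--             break
--
--     return label
-- ===== SOURCE B (Python) =====
-- def get_prm_label(data):
--     """Get PRM labels with normalization."""
--     labels = data["labels"]
--     for i, l in enumerate(labels):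
--         if l == -1:
--             return [1] * i + [-1]
--     return [1] * len(labels)
-- ===== Notes on version B (the rewrite author's own statement) =====
-- stated objective: simpler
-- what changed: Collapsed A's three passes (find first -1, rewrite prefix/suffix of a copied list, then re-scan and truncate) into one enumerate loop that returns [1]*i + [-1] at the first -1, or [1]*len(labels) if none; no intermediate normalized list is built.
import Mathlib
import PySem

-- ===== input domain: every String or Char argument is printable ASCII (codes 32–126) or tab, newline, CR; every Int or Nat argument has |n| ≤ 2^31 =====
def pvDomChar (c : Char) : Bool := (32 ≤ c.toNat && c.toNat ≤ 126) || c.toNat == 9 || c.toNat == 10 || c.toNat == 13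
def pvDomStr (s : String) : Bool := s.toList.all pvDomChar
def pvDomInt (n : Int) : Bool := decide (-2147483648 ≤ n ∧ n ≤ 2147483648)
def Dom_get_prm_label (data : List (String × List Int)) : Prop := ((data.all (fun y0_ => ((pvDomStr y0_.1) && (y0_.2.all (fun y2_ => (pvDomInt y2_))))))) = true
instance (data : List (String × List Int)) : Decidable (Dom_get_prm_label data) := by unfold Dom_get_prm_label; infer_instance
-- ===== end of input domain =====

-- B collapses A's three passes (find first -1, rewrite a copied list, re-scan and truncate)
-- into one enumerate loop returning [1]*i + [-1] (or [1]*len if no -1): simpler, same O(n) cost.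

-- ===== PORT A =====

-- data["labels"]: first-match lookup in the association list (KeyError = none, excluded by Pre_)
def pvLookupLabels : List (String × List Int) → Option (List Int)
  | [] => none
  | (k, v) :: rest => if k = "labels" then some v else pvLookupLabels rest

-- get_first_error_step_index: enumerate loop returning the index of the first -1, else len
def pvFirstErrorStepIndex : List Int → Nat
  | [] => 0
  | l :: rest => if l = -1 then 0 else pvFirstErrorStepIndex rest + 1

-- normalize_process_labels: copy, then the two index-assignment loops over ranges
def pvNormalizeProcessLabels (labels : List Int) : List Int :=
  if labels = [] then []
  else
    let firstErrorPos := pvFirstErrorStepIndex labels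
    let n1 := (List.range firstErrorPos).foldl (fun acc i => acc.set i 1) labels
    (List.range' firstErrorPos (labels.length - firstErrorPos)).foldl
      (fun acc i => acc.set i (-1)) n1

-- the final loop with append + break
def pvCutAtFirstErr : List Int → List Int
  | [] => []
  | l :: rest => if l = -1 then [l] else l :: pvCutAtFirstErr rest

def get_prm_label (data : List (String × List Int)) : List Int :=
  let full_labels := pvNormalizeProcessLabels ((pvLookupLabels data).getD [])
  pvCutAtFirstErr full_labels

-- ===== PORT B =====

-- the enumerate loop of Source B: i is the current index; [1]*i + [-1] at the first -1,
-- [1]*len(labels) (= replicate of the final i) if the loop completes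
def pvAltGo : List Int → Nat → List Int
  | [], i => List.replicate i 1
  | l :: rest, i => if l = -1 then List.replicate i 1 ++ [-1] else pvAltGo rest (i + 1)

def get_prm_label_alt (data : List (String × List Int)) : List Int :=
  pvAltGo ((pvLookupLabels data).getD []) 0

-- ===== PRECONDITION & SPEC =====
-- Pre_ excludes exactly the inputs where data["labels"] raises KeyError.
def Pre_get_prm_label (data : List (String × List Int)) : Prop :=
  "labels" ∈ data.map Prod.fst
instance (data : List (String × List Int)) : Decidable (Pre_get_prm_label data) := by
  unfold Pre_get_prm_label; infer_instance

def pvWitness_get_prm_label : (List (String × List Int)) := [("labels", [1, -1, 0])]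

def Spec_get_prm_label (data : List (String × List Int)) (out : List Int) : Prop := out = get_prm_label_alt data
instance (data : List (String × List Int)) (out : List Int) : Decidable (Spec_get_prm_label data out) := by unfold Spec_get_prm_label; infer_instance

-- ===== CLAIM (what is proved, stated in full; the proofs are below) =====
def Claim_equal_get_prm_label : Prop := ∀ (data : List (String × List Int)), Dom_get_prm_label data → Pre_get_prm_label data → Spec_get_prm_label data (get_prm_label data)

-- ===== LEMMAS AND PROOFS =====

theorem pvFirstErr_le (xs : List Int) : pvFirstErrorStepIndex xs ≤ xs.length := by
  induction xs with
  | nil => simp [pvFirstErrorStepIndex]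
  | cons l rest ih =>
    simp only [pvFirstErrorStepIndex, List.length_cons]
    split <;> omega

theorem pvSetOnes (p : Nat) (xs : List Int) (h : p ≤ xs.length) :
    (List.range p).foldl (fun acc i => acc.set i 1) xs
      = List.replicate p 1 ++ xs.drop p := by
  induction p with
  | zero => simp
  | succ n ih =>
    rw [List.range_succ, List.foldl_append, ih (by omega)]
    simp only [List.foldl_cons, List.foldl_nil]
    rw [List.set_append_right _ _ (by simp)]
    simp only [List.length_replicate, Nat.sub_self]
    have hd : xs.drop n = xs[n] :: xs.drop (n + 1) :=
      List.drop_eq_getElem_cons (by omega)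
    rw [hd, List.set_cons_zero]
    simp [List.replicate_succ', List.append_assoc]

theorem pvSetNegs (s : Nat) (xs : List Int) : ∀ (k : Nat), s + k ≤ xs.length →
    (List.range' s k).foldl (fun acc i => acc.set i (-1)) xs
      = xs.take s ++ List.replicate k (-1) ++ xs.drop (s + k) := by
  intro k
  induction k with
  | zero => intro h; simp
  | succ n ih =>
    intro h
    rw [List.range'_concat, List.foldl_append, ih (by omega)]
    simp only [List.foldl_cons, List.foldl_nil]
    have htk : (xs.take s).length = s := by rw [List.length_take]; omega
    rw [List.append_assoc, List.set_append_right _ _ (by rw [htk]; omega)]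
    rw [htk, show s + 1 * n - s = n from by omega]
    rw [List.set_append_right _ _ (by simp)]
    simp only [List.length_replicate, Nat.sub_self]
    have hd : xs.drop (s + n) = xs[s + n]'(by omega) :: xs.drop (s + n + 1) :=
      List.drop_eq_getElem_cons (by omega)
    rw [hd, List.set_cons_zero]
    simp [List.replicate_succ', List.append_assoc, Nat.add_assoc]

theorem pvNormalize_eq (xs : List Int) :
    pvNormalizeProcessLabels xs
      = List.replicate (pvFirstErrorStepIndex xs) 1
        ++ List.replicate (xs.length - pvFirstErrorStepIndex xs) (-1) := by
  by_cases hx : xs = []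
  · simp [pvNormalizeProcessLabels, hx, pvFirstErrorStepIndex]
  · have hle := pvFirstErr_le xs
    simp only [pvNormalizeProcessLabels, if_neg hx]
    set p := pvFirstErrorStepIndex xs with hp
    rw [pvSetOnes p xs hle]
    rw [pvSetNegs p (List.replicate p (1 : Int) ++ xs.drop p) (xs.length - p)
      (by simp only [List.length_append, List.length_replicate, List.length_drop]; omega)]
    have h1 : (List.replicate p (1 : Int) ++ xs.drop p).take p = List.replicate p 1 := by
      rw [List.take_append_of_le_length (by simp)]
      simp
    have h2 : (List.replicate p (1 : Int) ++ xs.drop p).drop (p + (xs.length - p)) = [] := by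
      apply List.drop_eq_nil_of_le
      simp only [List.length_append, List.length_replicate, List.length_drop]
      omega
    rw [h1, h2, List.append_nil]

theorem pvCut_repl (p m : Nat) :
    pvCutAtFirstErr (List.replicate p 1 ++ List.replicate m (-1))
      = if m = 0 then List.replicate p 1 else List.replicate p 1 ++ [-1] := by
  induction p with
  | zero =>
    cases m with
    | zero => simp [pvCutAtFirstErr]
    | succ n => simp [List.replicate_succ, pvCutAtFirstErr]
  | succ n ih =>
    simp only [List.replicate_succ, List.cons_append, pvCutAtFirstErr]
    rw [if_neg (by decide), ih]
    by_cases hm : m = 0 <;> simp [hm]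

theorem pvAltGo_eq (xs : List Int) : ∀ (i : Nat),
    pvAltGo xs i
      = List.replicate i 1
        ++ (if pvFirstErrorStepIndex xs < xs.length
            then List.replicate (pvFirstErrorStepIndex xs) 1 ++ [-1]
            else List.replicate xs.length 1) := by
  induction xs with
  | nil => intro i; simp [pvAltGo, pvFirstErrorStepIndex]
  | cons l rest ih =>
    intro i
    simp only [pvAltGo, pvFirstErrorStepIndex, List.length_cons]
    by_cases hl : l = -1
    · simp only [if_pos hl]
      rw [if_pos (by omega : (0 : Nat) < rest.length + 1)]
      simp
    · rw [if_neg hl, if_neg hl, ih (i + 1)]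
      by_cases hlt : pvFirstErrorStepIndex rest < rest.length
      · have h2 : pvFirstErrorStepIndex rest + 1 < rest.length + 1 := by omega
        rw [if_pos hlt, if_pos h2]
        rw [List.replicate_succ' (n := i), List.replicate_succ (n := pvFirstErrorStepIndex rest)]
        simp [List.append_assoc]
      · have h2 : ¬ pvFirstErrorStepIndex rest + 1 < rest.length + 1 := by omega
        rw [if_neg hlt, if_neg h2]
        rw [List.replicate_succ' (n := i), List.replicate_succ (n := rest.length)]
        simp [List.append_assoc]

theorem pv_main (xs : List Int) :
    pvCutAtFirstErr (pvNormalizeProcessLabels xs) = pvAltGo xs 0 := by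
  rw [pvNormalize_eq, pvCut_repl, pvAltGo_eq]
  have hle := pvFirstErr_le xs
  by_cases h : pvFirstErrorStepIndex xs < xs.length
  · rw [if_neg (by omega), if_pos h]; simp
  · rw [if_pos (by omega), if_neg h]
    simp
    omega

-- ===== VERDICT (by name: the statement is the Claim_ definition above) =====
theorem get_prm_label_spec : Claim_equal_get_prm_label := by
  intro data _ _
  unfold Spec_get_prm_label get_prm_label get_prm_label_alt
  exact pv_main _
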